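-- pv_equiv track=rewrite | github.com/rocky/python-decompile3 | test/simple_source/bug36/01_if_and_if_bug.py | strftest2
-- ===== SOURCE A (Python) =====
-- def strftest2(now, a, there, shape_t):
--     for e in now:
--         if a:
--             if e:
--                 shape_t += 3
--         elif there:
--                 shape_t = 2
--     return shape_t
-- ===== SOURCE B (Python) =====
-- def strftest2(now, a, there, shape_t):
--     if not a:
--         # the 'there' assignment only fires if the loop ran at least once
--         return 2 if (there and now) else shape_t
--     # truthy elements = all elements minus the zeros; count zeros with list.count
--     return shape_t + 3 * (len(now) - now.count(0))
-- ===== Notes on version B (the rewrite author's own statement) =====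
-- stated objective: simpler
-- what changed: Removes the per-element branching loop entirely: guard clauses handle the non-a cases with a one-time nonempty check, and the a case becomes arithmetic shape_t + 3*(len(now) - now.count(0)) using the library zero-count instead of conditional accumulation.
import Mathlib
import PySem

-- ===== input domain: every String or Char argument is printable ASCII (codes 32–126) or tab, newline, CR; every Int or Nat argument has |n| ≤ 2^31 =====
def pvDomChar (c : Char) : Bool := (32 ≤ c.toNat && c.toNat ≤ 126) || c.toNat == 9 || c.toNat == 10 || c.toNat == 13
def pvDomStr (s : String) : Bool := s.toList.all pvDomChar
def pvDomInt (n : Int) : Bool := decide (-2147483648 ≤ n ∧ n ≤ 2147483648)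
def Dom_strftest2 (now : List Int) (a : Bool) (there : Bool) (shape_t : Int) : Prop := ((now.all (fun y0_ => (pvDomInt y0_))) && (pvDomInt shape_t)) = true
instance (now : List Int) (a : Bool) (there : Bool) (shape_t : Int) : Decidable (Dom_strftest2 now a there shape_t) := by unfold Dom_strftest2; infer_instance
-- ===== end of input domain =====

-- B removes the loop: guard clauses plus arithmetic on len(now) and now.count(0)
-- replace per-element conditional accumulation (objective: simpler).

-- ===== PORT A =====
def strftest2 (now : List Int) (a : Bool) (there : Bool) (shape_t : Int) : Int :=
  now.foldl (fun s e =>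
    if a then (if e ≠ 0 then s + 3 else s)
    else if there then 2 else s) shape_t

-- ===== PORT B =====
def strftest2_alt (now : List Int) (a : Bool) (there : Bool) (shape_t : Int) : Int :=
  if !a then (if there && !now.isEmpty then 2 else shape_t)
  else shape_t + 3 * ((now.length : Int) - (PySem.List.count now 0 : Int))

-- ===== PRECONDITION & SPEC =====
def Spec_strftest2 (now : List Int) (a : Bool) (there : Bool) (shape_t : Int) (out : Int) : Prop := out = strftest2_alt now a there shape_t
instance (now : List Int) (a : Bool) (there : Bool) (shape_t : Int) (out : Int) : Decidable (Spec_strftest2 now a there shape_t out) := by unfold Spec_strftest2; infer_instance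

-- ===== CLAIM (what is proved, stated in full; the proofs are below) =====
def Claim_equal_strftest2 : Prop := ∀ (now : List Int) (a : Bool) (there : Bool) (shape_t : Int), Dom_strftest2 now a there shape_t → Spec_strftest2 now a there shape_t (strftest2 now a there shape_t)

-- ===== LEMMAS AND PROOFS =====
theorem strftest2_eq (now : List Int) (a : Bool) (there : Bool) (shape_t : Int) :
    strftest2 now a there shape_t = strftest2_alt now a there shape_t := by
  induction now generalizing shape_t with
  | nil => cases a <;> cases there <;> simp [strftest2, strftest2_alt]
  | cons x xs ih =>
    cases a with
    | true =>
      have h := ih (if x ≠ 0 then shape_t + 3 else shape_t)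
      by_cases hx : x = 0 <;>
        simp [strftest2, strftest2_alt, PySem.List.count, hx] at h ⊢ <;>
        rw [h] <;> push_cast <;> ring
    | false =>
      cases there with
      | false => simp only [strftest2, strftest2_alt] at ih ⊢; simpa using ih shape_t
      | true =>
        have h2 := ih 2
        simp only [strftest2, List.foldl_cons] at h2 ⊢
        norm_num at h2 ⊢
        rw [h2]; cases xs <;> simp [strftest2_alt]

-- ===== VERDICT (by name: the statement is the Claim_ definition above) =====
theorem strftest2_spec : Claim_equal_strftest2 := by
  intro now a there shape_t _
  exact strftest2_eq now a there shape_t
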